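-- pv_equiv track=rewrite | github.com/BrunoGomesCoelho/AdvancedAlgortihms | week10/ex2.py | solve
-- ===== SOURCE A (Python) =====
-- def solve(array):
--     # Initially the highest sequence up to element i is the element itself
--     #   of lenght 1
--     lds = [1]*len(array)
--
--     # Bases on the fact that:
--     # lds[i] = 1 + max(lds[j] if j < i and arr[j] > arr[i])
--     #   if no j satisfies, lds[i] = 1
--
--     for i, _ in enumerate(array):
--         new_value = 0
--         for j in range(i):
--             # Here automatically we have j < i
--             if array[j] > array[i]:
--                 new_value = max(1, lds[j])
--         lds[i] = 1 + new_value
--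
--     return max(lds)
-- ===== SOURCE B (Python) =====
-- def solve(array):
--     # Monotonic stack of (value, chain_length): single pass, nearest previous
--     # strictly greater element determines each chain length.
--     best = 0
--     stack = []  # top at the end; values strictly increase toward the bottom
--     for x in array:
--         while stack and stack[-1][0] <= x:
--             stack.pop()
--         d = 1 + stack[-1][1] if stack else 1
--         stack.append((x, d))
--         if d > best:
--             best = d
--     return best
-- ===== Notes on version B (the rewrite author's own statement) =====
-- stated objective: faster
-- what changed: A rescans all earlier elements for every position (its overwritten inner accumulator keeps only the nearest previous strictly greater element); B computes that nearest previous greater element with a monotonic stack in one pass while tracking the running maximum chain length.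
import Mathlib
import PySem

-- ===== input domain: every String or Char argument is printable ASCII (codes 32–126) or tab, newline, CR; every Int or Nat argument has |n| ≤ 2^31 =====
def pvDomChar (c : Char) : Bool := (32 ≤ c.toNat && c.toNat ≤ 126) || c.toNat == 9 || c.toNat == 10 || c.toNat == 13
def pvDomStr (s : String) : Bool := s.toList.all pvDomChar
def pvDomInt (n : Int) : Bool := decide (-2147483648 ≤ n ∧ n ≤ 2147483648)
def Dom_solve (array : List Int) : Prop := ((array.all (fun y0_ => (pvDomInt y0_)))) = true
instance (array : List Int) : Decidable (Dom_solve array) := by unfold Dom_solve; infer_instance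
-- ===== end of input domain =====

-- B replaces A's quadratic rescan (whose overwritten inner accumulator keeps only the
-- NEAREST previous greater element) by a single pass with a monotonic stack; objective: faster.

-- ===== PORT A =====
def solve (array : List Int) : Int :=
  -- lds = [1]*len(array)
  let lds0 : List Int := List.replicate array.length 1
  -- for i, _ in enumerate(array): …
  let lds := (PySem.List.enumerate array).foldl (fun lds p =>
      -- new_value = 0; for j in range(i): if array[j] > array[i]: new_value = max(1, lds[j])
      let nv : Int := (PySem.List.pyRange 0 p.1 1).foldl (fun nv j =>
          if PySem.List.pyGetD array j 0 > PySem.List.pyGetD array p.1 0 then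
            max 1 (PySem.List.pyGetD lds j 0)
          else nv) 0
      -- lds[i] = 1 + new_value   (indices are always in range here)
      PySem.List.pySetD lds p.1 (1 + nv)) lds0
  -- return max(lds)   (raises ValueError on an empty list: excluded by Pre_)
  (PySem.List.max? lds (fun y => y)).getD 0

-- ===== PORT B =====
def solve_alt (array : List Int) : Int :=
  (array.foldl (fun (st : List (Int × Int) × Int) x =>
      -- while stack and stack[-1][0] <= x: stack.pop()
      let stack := st.1.dropWhile (fun p => p.1 ≤ x)
      -- d = 1 + stack[-1][1] if stack else 1
      let d : Int := match stack with
        | [] => 1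
        | p :: _ => 1 + p.2
      -- stack.append((x, d)); best = max(best, d)
      ((x, d) :: stack, if d > st.2 then d else st.2)) ([], 0)).2

-- ===== PRECONDITION & SPEC =====
-- Pre_ excludes only the empty list, on which A's `max(lds)` raises ValueError.
def Pre_solve (array : List Int) : Prop := array ≠ []
instance (array : List Int) : Decidable (Pre_solve array) := by unfold Pre_solve; infer_instance
def pvWitness_solve : List Int := [3, 1, 2]

def Spec_solve (array : List Int) (out : Int) : Prop := out = solve_alt array
instance (array : List Int) (out : Int) : Decidable (Spec_solve array out) := by unfold Spec_solve; infer_instance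

-- ===== CLAIM (what is proved, stated in full; the proofs are below) =====
def Claim_equal_solve : Prop := ∀ (array : List Int), Dom_solve array → Pre_solve array → Spec_solve array (solve array)

-- ===== LEMMAS AND PROOFS =====

-- chain length contributed by the nearest previous strictly greater element of x
def nvOf (hist : List (Int × Int)) (x : Int) : Int :=
  match hist.find? (fun p => decide (x < p.1)) with
  | some p => p.2
  | none => 0

def modelStep (hist : List (Int × Int)) (x : Int) : List (Int × Int) :=
  (x, 1 + nvOf hist x) :: hist

def modelRun (hist : List (Int × Int)) (l : List Int) : List (Int × Int) :=
  l.foldl modelStep hist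

def maxOf (hist : List (Int × Int)) : Int := (hist.map (·.2)).foldl max 0

def aIdx (array : List Int) (j : Nat) : Int := array.getD j 0

def histUpTo (a : Nat → Int) : Nat → List (Int × Int)
  | 0 => []
  | k+1 => modelStep (histUpTo a k) (a k)

def vOf (a : Nat → Int) (j : Nat) : Int := 1 + nvOf (histUpTo a j) (a j)

-- A's proof-side step function (the body of A's outer loop, p.1 beta-reduced)
def stepA (array : List Int) (lds : List Int) (i : Int) : List Int :=
  let nv : Int := (PySem.List.pyRange 0 i 1).foldl (fun nv j =>
      if PySem.List.pyGetD array j 0 > PySem.List.pyGetD array i 0 then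
        max 1 (PySem.List.pyGetD lds j 0)
      else nv) 0
  PySem.List.pySetD lds i (1 + nv)

theorem foldl_overwrite {α β : Type} (Q : α → Prop) [DecidablePred Q] (g : α → β) :
    ∀ (l : List α) (b : β),
      l.foldl (fun acc j => if Q j then g j else acc) b =
        (l.reverse.find? (fun j => decide (Q j))).elim b g := by
  intro l
  induction l with
  | nil => intro b; simp
  | cons a l ih =>
    intro b
    simp only [List.foldl_cons, ih, List.reverse_cons, List.find?_append]
    cases hfind : l.reverse.find? (fun j => decide (Q j)) with
    | some j => simp
    | none =>
      by_cases hQ : Q a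
      · rw [if_pos hQ]; simp [List.find?_cons, hQ]
      · rw [if_neg hQ]; simp [List.find?_cons, hQ]

theorem find?_dropWhile {α : Type} (p q : α → Bool) (h : ∀ a, q a = true → p a = false) :
    ∀ l : List α, (l.dropWhile q).find? p = l.find? p := by
  intro l
  induction l with
  | nil => simp
  | cons a l ih =>
    by_cases hq : q a = true
    · simp [List.dropWhile_cons, hq, ih, List.find?_cons, h a hq]
    · simp [List.dropWhile_cons, hq]

theorem find?_eq_head?_dropWhile {α : Type} (p : α → Bool) :
    ∀ l : List α, l.find? p = (l.dropWhile (fun a => !p a)).head? := by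
  intro l
  induction l with
  | nil => simp
  | cons a l ih =>
    cases hp : p a <;> simp [List.find?_cons, List.dropWhile_cons, hp, ih]

theorem foldl_max_pull : ∀ (l : List Int) (a b : Int), l.foldl max (max a b) = max (l.foldl max a) b := by
  intro l
  induction l with
  | nil => simp
  | cons c l ih =>
    intro a b
    have h1 : max (max a b) c = max (max a c) b := by
      rcases le_total a b with h | h <;> rcases le_total a c with h2 | h2 <;>
        rcases le_total b c with h3 | h3 <;> simp [max_def] <;> omega
    simp only [List.foldl_cons, h1, ih]

theorem nvOf_nonneg (hist : List (Int × Int)) (x : Int) (h : ∀ p ∈ hist, 1 ≤ p.2) :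
    0 ≤ nvOf hist x := by
  unfold nvOf
  cases hfind : hist.find? (fun p => decide (x < p.1)) with
  | none => simp
  | some p =>
    have := h p (List.mem_of_find?_eq_some hfind)
    simp; omega

theorem histUpTo_pos (a : Nat → Int) : ∀ k, ∀ p ∈ histUpTo a k, 1 ≤ p.2 := by
  intro k
  induction k with
  | zero => simp [histUpTo]
  | succ k ih =>
    intro p hp
    simp only [histUpTo, modelStep, List.mem_cons] at hp
    rcases hp with rfl | hp
    · have := nvOf_nonneg (histUpTo a k) (a k) ih
      simp; omega
    · exact ih p hp

theorem histUpTo_eq_map (a : Nat → Int) :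
    ∀ k, histUpTo a k = (List.range k).reverse.map (fun j => (a j, vOf a j)) := by
  intro k
  induction k with
  | zero => simp [histUpTo]
  | succ k ih =>
    simp only [histUpTo, modelStep, ih, List.range_succ, List.reverse_append,
      List.reverse_cons, List.reverse_nil, List.nil_append, List.cons_append,
      List.map_cons, vOf]

theorem histUpTo_full (array : List Int) :
    ∀ k, k ≤ array.length → modelRun [] (array.take k) = histUpTo (aIdx array) k := by
  intro k
  induction k with
  | zero => intro _; simp [modelRun, histUpTo]
  | succ k ih =>
    intro hk
    have hk' : k < array.length := by omega
    rw [List.take_succ]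
    simp only [modelRun] at *
    rw [List.foldl_append, ih (by omega)]
    simp [histUpTo, aIdx, List.getD, List.getElem?_eq_getElem hk']

theorem maxOf_step (hist : List (Int × Int)) (x : Int) :
    maxOf (modelStep hist x) = max (maxOf hist) (1 + nvOf hist x) := by
  simp only [maxOf, modelStep, List.map_cons, List.foldl_cons]
  rw [show ((hist.map (·.2)).foldl max (max 0 (1 + nvOf hist x))) = max ((hist.map (·.2)).foldl max 0) (1 + nvOf hist x) from foldl_max_pull _ 0 _]

theorem vOf_pos (a : Nat → Int) (j : Nat) : 1 ≤ vOf a j := by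
  have := nvOf_nonneg (histUpTo a j) (a j) (histUpTo_pos a j)
  unfold vOf; omega

theorem foldl_max_reverse : ∀ (l : List Int) (a : Int), l.reverse.foldl max a = l.foldl max a := by
  intro l
  induction l with
  | nil => simp
  | cons x l ih =>
    intro a
    simp only [List.reverse_cons, List.foldl_append, List.foldl_cons, ih, List.foldl_nil]
    rw [show max a x = max a x from rfl, show l.foldl max (max a x) = max (l.foldl max a) x from foldl_max_pull l a x]

theorem maxD_eq (l : List Int) (h : l ≠ []) (hpos : ∀ v ∈ l, (1:Int) ≤ v) :
    (PySem.List.max? l (fun y => y)).getD 0 = l.reverse.foldl max 0 := by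
  cases l with
  | nil => exact absurd rfl h
  | cons x t =>
    rw [PySem.List.max?_id_cons x t, foldl_max_reverse]
    have hx : (1:Int) ≤ x := hpos x (by simp)
    simp only [Option.getD_some, List.foldl_cons]
    rw [show max (0:Int) x = x from by omega]

-- B's proof-side step function (the body of B's fold in solve_alt)
def bStep (st : List (Int × Int) × Int) (x : Int) : List (Int × Int) × Int :=
  let stack := st.1.dropWhile (fun p => p.1 ≤ x)
  let d : Int := match stack with
    | [] => 1
    | p :: _ => 1 + p.2
  ((x, d) :: stack, if d > st.2 then d else st.2)

-- B's fold: the stack's nearest-greater answers coincide with the full history's,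
-- and the running best is the maximum chain length over the history.
theorem B_inv : ∀ (l : List Int) (stack hist : List (Int × Int)),
    (∀ y : Int, stack.find? (fun p => decide (y < p.1)) = hist.find? (fun p => decide (y < p.1))) →
    (∀ y : Int, (l.foldl bStep (stack, maxOf hist)).1.find? (fun p => decide (y < p.1)) =
        (modelRun hist l).find? (fun p => decide (y < p.1))) ∧
    (l.foldl bStep (stack, maxOf hist)).2 = maxOf (modelRun hist l) := by
  intro l
  induction l with
  | nil => intro stack hist h; exact ⟨h, rfl⟩
  | cons x l ih =>
    intro stack hist h
    have hd1 : stack.dropWhile (fun p => decide (p.1 ≤ x)) =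
        stack.dropWhile (fun a => !(fun p : Int × Int => decide (x < p.1)) a) := by
      congr 1; funext a
      by_cases hax : a.1 ≤ x
      · simp [hax, show ¬(x < a.1) by omega]
      · simp [hax, show x < a.1 by omega]
    have hhead : (stack.dropWhile (fun p => decide (p.1 ≤ x))).head? =
        hist.find? (fun p => decide (x < p.1)) := by
      rw [hd1, ← find?_eq_head?_dropWhile]; exact h x
    have hd : (match stack.dropWhile (fun p => decide (p.1 ≤ x)) with
        | [] => (1:Int) | p :: _ => 1 + p.2) = 1 + nvOf hist x := by
      unfold nvOf
      rw [← hhead]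
      cases hc : stack.dropWhile (fun p => decide (p.1 ≤ x)) <;> simp
    have hbest : (if (1 + nvOf hist x) > maxOf hist then (1 + nvOf hist x) else maxOf hist) =
        maxOf (modelStep hist x) := by
      rw [maxOf_step]; split_ifs with hc <;> omega
    have hstep : bStep (stack, maxOf hist) x =
        ((x, 1 + nvOf hist x) :: stack.dropWhile (fun p => decide (p.1 ≤ x)),
          maxOf (modelStep hist x)) := by
      simp only [bStep, hd, hbest]
    have hinv2 : ∀ y : Int,
        ((x, 1 + nvOf hist x) :: stack.dropWhile (fun p => decide (p.1 ≤ x))).find?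
            (fun p => decide (y < p.1)) =
          (modelStep hist x).find? (fun p => decide (y < p.1)) := by
      intro y
      by_cases hyx : y < x
      · simp [modelStep, List.find?_cons, hyx]
      · have hdrop : (stack.dropWhile (fun p => decide (p.1 ≤ x))).find?
            (fun p => decide (y < p.1)) = stack.find? (fun p => decide (y < p.1)) :=
          find?_dropWhile _ _ (fun a ha => by simp at ha ⊢; omega) stack
        simp [modelStep, List.find?_cons, hyx, hdrop, h y]
    simp only [List.foldl_cons, hstep, modelRun]
    exact ih _ (modelStep hist x) hinv2

theorem solve_alt_eq (array : List Int) : solve_alt array = maxOf (modelRun [] array) := by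
  have := (B_inv array [] [] (fun y => rfl)).2
  exact this

theorem set_append_len {α : Type} : ∀ (l₁ : List α) (y : α) (l₂ : List α) (v : α),
    (l₁ ++ y :: l₂).set l₁.length v = l₁ ++ v :: l₂ := by
  intro l₁
  induction l₁ with
  | nil => simp
  | cons a l ih => intro y l₂ v; simp [ih]

theorem stepA_inner (array lds : List Int) (i : Int) :
    (PySem.List.pyRange 0 i 1).foldl (fun nv j =>
        if PySem.List.pyGetD array j 0 > PySem.List.pyGetD array i 0 then
          max 1 (PySem.List.pyGetD lds j 0)
        else nv) 0 =
      ((PySem.List.pyRange 0 i 1).reverse.find?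
          (fun j => decide (PySem.List.pyGetD array j 0 > PySem.List.pyGetD array i 0))).elim
        (0:Int) (fun j => max 1 (PySem.List.pyGetD lds j 0)) := by
  exact foldl_overwrite (fun j => PySem.List.pyGetD array j 0 > PySem.List.pyGetD array i 0)
    (fun j => max 1 (PySem.List.pyGetD lds j 0)) (PySem.List.pyRange 0 i 1) 0

-- A's outer loop, prefix by prefix
theorem A_outer (array : List Int) :
    ∀ k, k ≤ array.length →
      (PySem.List.pyRange 0 (k : Int) 1).foldl (stepA array) (List.replicate array.length 1) =
        (List.range k).map (fun j => vOf (aIdx array) j) ++ List.replicate (array.length - k) 1 := by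
  intro k
  induction k with
  | zero =>
    intro _
    rw [show ((0:Nat):Int) = 0 from rfl, PySem.List.pyRange_one_eq_nil le_rfl]
    simp
  | succ k ih =>
    intro hk
    have hk' : k < array.length := by omega
    have hcast : ((k+1 : Nat) : Int) = (k:Int) + 1 := by push_cast; ring
    rw [hcast, PySem.List.pyRange_one_succ_right (by positivity), List.foldl_append,
      List.foldl_cons, List.foldl_nil, ih (by omega)]
    -- notation
    set a := aIdx array with ha
    set vals := (List.range k).map (fun j => vOf a j) with hvals
    have hvlen : vals.length = k := by simp [hvals]
    simp only [stepA]
    rw [stepA_inner array (vals ++ List.replicate (array.length - k) 1) (k:Int)]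
    rw [PySem.List.pyRange_zero_nat k]
    rw [show (List.map (fun j : Nat => (j:Int)) (List.range k)).reverse =
        (List.range k).reverse.map (fun j : Nat => (j:Int)) from List.map_reverse.symm]
    rw [List.find?_map]
    have hpred : ((fun j : Int => decide (PySem.List.pyGetD array j 0 > PySem.List.pyGetD array (k:Int) 0)) ∘
        (fun j : Nat => (j:Int))) = (fun j : Nat => decide (a k < a j)) := by
      funext j; simp [ha, aIdx, gt_iff_lt]
    rw [hpred]
    have hnv : (((List.range k).reverse.find? (fun j : Nat => decide (a k < a j))).map
          (fun j : Nat => (j:Int))).elim (0:Int)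
          (fun j => max 1 (PySem.List.pyGetD (vals ++ List.replicate (array.length - k) 1) j 0)) =
        nvOf (histUpTo a k) (a k) := by
      rw [histUpTo_eq_map]
      unfold nvOf
      rw [List.find?_map]
      have hpred2 : ((fun p : Int × Int => decide (a k < p.1)) ∘ (fun j : Nat => (a j, vOf a j))) =
          (fun j : Nat => decide (a k < a j)) := by funext j; rfl
      rw [hpred2]
      cases hfind : (List.range k).reverse.find? (fun j : Nat => decide (a k < a j)) with
      | none => simp
      | some j =>
        have hj : j < k := by
          have := List.mem_of_find?_eq_some hfind
          simp at this; exact this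
        have hg : PySem.List.pyGetD (vals ++ List.replicate (array.length - k) 1) (j:Int) 0 = vOf a j := by
          have h1 : PySem.List.pyGetD (vals ++ List.replicate (array.length - k) 1) (j:Int) 0 =
              (vals ++ List.replicate (array.length - k) 1).getD j 0 := by simp
          rw [h1, List.getD_eq_getElem?_getD, List.getElem?_append_left (by rw [hvlen]; exact hj),
            hvals]
          simp [List.getElem?_map, List.getElem?_range hj]
        simp [hg]
        have := vOf_pos a j
        omega
    rw [hnv]
    have hvk : 1 + nvOf (histUpTo a k) (a k) = vOf a k := rfl
    rw [hvk]
    have hrep : array.length - k = (array.length - (k+1)) + 1 := by omega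
    rw [hrep, List.replicate_succ]
    have hset : PySem.List.pySetD (vals ++ (1:Int) :: List.replicate (array.length - (k+1)) 1) (k:Int) (vOf a k) =
        vals ++ vOf a k :: List.replicate (array.length - (k+1)) 1 := by
      have h2 : PySem.List.pySetD (vals ++ (1:Int) :: List.replicate (array.length - (k+1)) 1) (k:Int) (vOf a k) =
          (vals ++ (1:Int) :: List.replicate (array.length - (k+1)) 1).set k (vOf a k) := by simp
      rw [h2, ← hvlen, set_append_len]
    rw [hset, List.range_succ, List.map_append]
    simp
    exact hvals

theorem solve_eq (array : List Int) (h : array ≠ []) :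
    solve array = maxOf (histUpTo (aIdx array) array.length) := by
  have hsolve : solve array = (PySem.List.max? ((PySem.List.enumerate array).foldl
      (fun lds p => stepA array lds p.1) (List.replicate array.length 1)) (fun y => y)).getD 0 := rfl
  have key : (PySem.List.enumerate array).foldl (fun lds p => stepA array lds p.1)
      (List.replicate array.length 1) =
        (PySem.List.pyRange 0 ((array.length : Nat) : Int) 1).foldl (stepA array)
          (List.replicate array.length 1) := by
    rw [PySem.List.enumerate_eq_map_pyRange (d := 0), List.foldl_map]
    rfl
  rw [hsolve, key, A_outer array array.length le_rfl, Nat.sub_self, List.replicate_zero,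
    List.append_nil]
  have hn : array.length ≠ 0 := fun hc => h (List.length_eq_zero_iff.mp hc)
  have hne : (List.range array.length).map (fun j => vOf (aIdx array) j) ≠ [] := by
    simp [List.range_eq_nil, hn]
  have hpos : ∀ v ∈ (List.range array.length).map (fun j => vOf (aIdx array) j), (1:Int) ≤ v := by
    intro v hv
    simp only [List.mem_map] at hv
    obtain ⟨j, _, rfl⟩ := hv
    exact vOf_pos _ j
  rw [maxD_eq _ hne hpos, histUpTo_eq_map]
  unfold maxOf
  rw [← List.map_reverse, List.map_map]
  rfl

-- ===== VERDICT (by name: the statement is the Claim_ definition above) =====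
theorem solve_spec : Claim_equal_solve := by
  intro array _ hpre
  unfold Spec_solve
  rw [solve_eq array hpre, solve_alt_eq, ← histUpTo_full array array.length le_rfl, List.take_length]
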